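-- pv_equiv track=rewrite | github.com/JHyeok/Programmers | src/main/level1/모의고사/solution.py | solution
-- ===== SOURCE A (Python) =====
-- def solution(answers):
--     answer = []
--
--     people1 = [1, 2, 3, 4, 5]
--     people2 = [2, 1, 2, 3, 2, 4, 2, 5]
--     people3 = [3, 3, 1, 1, 2, 2, 4, 4, 5, 5]
--     score = [0, 0, 0]
--
--     for i in range(0, len(answers)):
--         if people1[i%len(people1)] == answers[i]:
--             score[0] += 1
--         if people2[i%len(people2)] == answers[i]:
--             score[1] += 1
--         if people3[i%len(people3)] == answers[i]:
--             score[2] += 1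
--
--     best_score = max(score)
--     for i in range(0, len(score)):
--         if score[i] == best_score:
--             answer.append(i + 1)
--
--     return answer
-- ===== SOURCE B (Python) =====
-- def solution(answers):
--     # Aggregate answers into a histogram keyed by (index mod 40, answer) in one pass
--     # (40 = lcm of the three pattern lengths), then score each pattern by 40 lookups
--     # independent of len(answers).
--     PERIOD = 40
--     hist = {}
--     for i, a in enumerate(answers):
--         key = (i % PERIOD, a)
--         hist[key] = hist.get(key, 0) + 1
--     patterns = [[1, 2, 3, 4, 5],
--                 [2, 1, 2, 3, 2, 4, 2, 5],
--                 [3, 3, 1, 1, 2, 2, 4, 4, 5, 5]]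
--     scores = [sum(hist.get((r, p[r % len(p)]), 0) for r in range(PERIOD))
--               for p in patterns]
--     best = max(scores)
--     return [i + 1 for i, s in enumerate(scores) if s == best]
-- ===== Notes on version B (the rewrite author's own statement) =====
-- stated objective: alternative
-- what changed: Instead of A's single interleaved pass keeping three counters, B builds a hash histogram keyed by (index mod 40, answer) in one aggregation pass (40 = lcm of the pattern lengths) and then scores each pattern with 40 histogram lookups, never rescanning the answers.
import Mathlib
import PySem

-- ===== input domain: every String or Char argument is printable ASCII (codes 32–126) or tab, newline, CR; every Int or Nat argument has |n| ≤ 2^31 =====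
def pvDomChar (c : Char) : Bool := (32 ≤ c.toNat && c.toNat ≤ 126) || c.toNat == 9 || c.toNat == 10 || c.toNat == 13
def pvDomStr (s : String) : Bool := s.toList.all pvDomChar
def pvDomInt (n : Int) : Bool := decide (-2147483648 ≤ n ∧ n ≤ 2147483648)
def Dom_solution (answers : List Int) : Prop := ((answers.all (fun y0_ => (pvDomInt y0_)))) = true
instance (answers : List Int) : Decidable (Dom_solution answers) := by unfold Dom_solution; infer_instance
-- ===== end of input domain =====

-- B replaces A's interleaved three-counter scan by one aggregation pass into a histogram
-- keyed by (index mod 40, answer) plus 40 lookups per pattern (alternative algorithm, same cost).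


-- ===== PORT A =====
-- all list indices A uses (i < len(answers), i % len(pattern)) are in range, so pyGetD … 0 is exact
def solution (answers : List Int) : List Int :=
  let people1 : List Int := [1, 2, 3, 4, 5]
  let people2 : List Int := [2, 1, 2, 3, 2, 4, 2, 5]
  let people3 : List Int := [3, 3, 1, 1, 2, 2, 4, 4, 5, 5]
  let score :=
    (PySem.List.pyRange 0 (answers.length : Int) 1).foldl
      (fun (s : Int × Int × Int) i =>
        let a := PySem.List.pyGetD answers i 0
        let s0 := if PySem.List.pyGetD people1 (PySem.Int.mod i (people1.length : Int)) 0 == a then s.1 + 1 else s.1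
        let s1 := if PySem.List.pyGetD people2 (PySem.Int.mod i (people2.length : Int)) 0 == a then s.2.1 + 1 else s.2.1
        let s2 := if PySem.List.pyGetD people3 (PySem.Int.mod i (people3.length : Int)) 0 == a then s.2.2 + 1 else s.2.2
        (s0, s1, s2))
      (0, 0, 0)
  let scoreList : List Int := [score.1, score.2.1, score.2.2]
  let best := (PySem.List.max? scoreList (fun x => x)).getD 0
  (PySem.List.pyRange 0 (scoreList.length : Int) 1).foldl
    (fun acc i => if PySem.List.pyGetD scoreList i 0 == best then acc ++ [i + 1] else acc) []

-- ===== PORT B =====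
-- hist[(i % 40, a)] += 1 over enumerate(answers); then each pattern scored by 40 lookups
def solution_alt (answers : List Int) : List Int :=
  let period : Int := 40
  let hist :=
    (PySem.List.enumerate answers 0).foldl
      (fun (h : PySem.Dict (Int × Int) Int) ia =>
        let key := (PySem.Int.mod ia.1 period, ia.2)
        h.insert key (h.getD key 0 + 1))
      PySem.Dict.empty
  let patterns : List (List Int) :=
    [[1, 2, 3, 4, 5], [2, 1, 2, 3, 2, 4, 2, 5], [3, 3, 1, 1, 2, 2, 4, 4, 5, 5]]
  let scores := patterns.map (fun p =>
    (PySem.List.pyRange 0 period 1).foldl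
      (fun acc r =>
        acc + hist.getD (r, PySem.List.pyGetD p (PySem.Int.mod r (p.length : Int)) 0) 0)
      0)
  let best := (PySem.List.max? scores (fun x => x)).getD 0
  (PySem.List.enumerate scores 0).filterMap
    (fun is => if is.2 == best then some (is.1 + 1) else none)

-- ===== PRECONDITION & SPEC =====
def Spec_solution (answers : List Int) (out : List Int) : Prop := out = solution_alt answers
instance (answers : List Int) (out : List Int) : Decidable (Spec_solution answers out) := by unfold Spec_solution; infer_instance

-- ===== CLAIM (what is proved, stated in full; the proofs are below) =====
def Claim_equal_solution : Prop := ∀ (answers : List Int), Dom_solution answers → Spec_solution answers (solution answers)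

-- ===== LEMMAS AND PROOFS =====

-- proof-side specification: number of i with p[i % len p] == answers[i]
def countMatches (p : List Int) (answers : List Int) : Int :=
  (PySem.List.enumerate answers 0).foldl
    (fun acc ia =>
      if PySem.List.pyGetD p (PySem.Int.mod ia.1 (p.length : Int)) 0 == ia.2 then acc + 1 else acc)
    0

-- B's histogram and per-pattern score, as named pieces of solution_alt
def histOf (xs : List Int) : PySem.Dict (Int × Int) Int :=
  (PySem.List.enumerate xs 0).foldl
    (fun (h : PySem.Dict (Int × Int) Int) ia =>
      let key := (PySem.Int.mod ia.1 40, ia.2)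
      h.insert key (h.getD key 0 + 1))
    PySem.Dict.empty

def histScore (xs p : List Int) : Int :=
  (PySem.List.pyRange 0 40 1).foldl
    (fun acc r =>
      acc + (histOf xs).getD (r, PySem.List.pyGetD p (PySem.Int.mod r (p.length : Int)) 0) 0)
    0

-- A's interleaved counting pass equals one independent count per pattern.
lemma score_eq (p1 p2 p3 : List Int) (xs : List Int) :
    (PySem.List.pyRange 0 (xs.length : Int) 1).foldl
      (fun (s : Int × Int × Int) i =>
        let a := PySem.List.pyGetD xs i 0
        let s0 := if PySem.List.pyGetD p1 (PySem.Int.mod i (p1.length : Int)) 0 == a then s.1 + 1 else s.1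
        let s1 := if PySem.List.pyGetD p2 (PySem.Int.mod i (p2.length : Int)) 0 == a then s.2.1 + 1 else s.2.1
        let s2 := if PySem.List.pyGetD p3 (PySem.Int.mod i (p3.length : Int)) 0 == a then s.2.2 + 1 else s.2.2
        (s0, s1, s2))
      (0, 0, 0)
    = (countMatches p1 xs, countMatches p2 xs, countMatches p3 xs) := by
  induction xs using List.reverseRecOn with
  | nil =>
      simp [countMatches, PySem.List.enumerate, PySem.List.pyRange_one_eq_nil]
  | append_singleton xs x ih =>
      have hlen : ((xs ++ [x]).length : Int) = (xs.length : Int) + 1 := by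
        simp
      rw [hlen, PySem.List.pyRange_one_succ_right (by positivity), List.foldl_append]
      have hcongr :
          (PySem.List.pyRange 0 (xs.length : Int) 1).foldl
            (fun (s : Int × Int × Int) i =>
              let a := PySem.List.pyGetD (xs ++ [x]) i 0
              let s0 := if PySem.List.pyGetD p1 (PySem.Int.mod i (p1.length : Int)) 0 == a then s.1 + 1 else s.1
              let s1 := if PySem.List.pyGetD p2 (PySem.Int.mod i (p2.length : Int)) 0 == a then s.2.1 + 1 else s.2.1
              let s2 := if PySem.List.pyGetD p3 (PySem.Int.mod i (p3.length : Int)) 0 == a then s.2.2 + 1 else s.2.2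
              (s0, s1, s2))
            (0, 0, 0)
          = (countMatches p1 xs, countMatches p2 xs, countMatches p3 xs) := by
        rw [← ih]
        apply PySem.List.foldl_congr_mem
        intro acc i hi
        have hmem := (PySem.List.mem_pyRange_one).mp hi
        have h0 : 0 ≤ i := hmem.1
        have h1 : i < (xs.length : Int) := hmem.2
        have hget : PySem.List.pyGetD (xs ++ [x]) i 0 = PySem.List.pyGetD xs i 0 := by
          rw [PySem.List.pyGetD_eq_getElem _ _ h0 (by simp; omega),
              PySem.List.pyGetD_eq_getElem _ _ h0 h1,
              List.getElem_append_left]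
        simp only [hget]
      rw [hcongr]
      have hlast : PySem.List.pyGetD (xs ++ [x]) (xs.length : Int) 0 = x := by
        rw [PySem.List.pyGetD_eq_getElem _ _ (by positivity) (by simp)]
        simp
      have hcm : ∀ p : List Int, countMatches p (xs ++ [x]) =
          if PySem.List.pyGetD p (PySem.Int.mod (xs.length : Int) (p.length : Int)) 0 == x
          then countMatches p xs + 1 else countMatches p xs := by
        intro p
        unfold countMatches
        rw [PySem.List.enumerate_append, List.foldl_append]
        simp [PySem.List.enumerate]
      simp only [List.foldl_cons, List.foldl_nil, hlast, hcm]

-- inserting (k ↦ old+1) raises a sum of lookups at keys (r, g r), r from a Nodup list, by an indicator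
lemma sum_insert (h : PySem.Dict (Int × Int) Int) (k : Int × Int) (g : Int → Int)
    (rs : List Int) (hnd : rs.Nodup) :
    (rs.map (fun r => (h.insert k (h.getD k 0 + 1)).getD (r, g r) 0)).sum
    = (rs.map (fun r => h.getD (r, g r) 0)).sum
      + (if k.1 ∈ rs ∧ g k.1 = k.2 then 1 else 0) := by
  induction rs with
  | nil => simp
  | cons r rs ih =>
      have hnd' : rs.Nodup := hnd.of_cons
      rw [List.map_cons, List.map_cons, List.sum_cons, List.sum_cons, ih hnd',
          PySem.Dict.getD_insert]
      by_cases hk : ((r, g r) : Int × Int) = k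
      · have hk1 : r = k.1 := congrArg Prod.fst hk
        have hk2 : g k.1 = k.2 := by rw [← hk1]; exact congrArg Prod.snd hk
        have hnotin : k.1 ∉ rs := hk1 ▸ (List.nodup_cons.mp hnd).1
        have hind1 : (if k.1 ∈ rs ∧ g k.1 = k.2 then (1 : Int) else 0) = 0 := by
          simp [hnotin]
        have hk2' : g r = k.2 := by rw [hk1]; exact hk2
        have hind2 : (if k.1 ∈ r :: rs ∧ g k.1 = k.2 then (1 : Int) else 0) = 1 := by
          simp [← hk1, hk2']
        rw [if_pos hk, hind1, hind2, hk]
        ring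
      · have hcond : (k.1 ∈ r :: rs ∧ g k.1 = k.2) ↔ (k.1 ∈ rs ∧ g k.1 = k.2) := by
          constructor
          · rintro ⟨hm, hg⟩
            rcases List.mem_cons.mp hm with hm | hm
            · exfalso
              apply hk
              have hr : r = k.1 := hm.symm
              subst hr
              rw [hg]
            · exact ⟨hm, hg⟩
          · rintro ⟨hm, hg⟩; exact ⟨List.mem_cons_of_mem _ hm, hg⟩
        rw [if_neg hk, if_congr hcond rfl rfl]
        ring

-- a sum of lookups in the empty dict is zero
lemma sum_empty (q : Int → Int) (rs : List Int) :
    (rs.map (fun r => (PySem.Dict.empty : PySem.Dict (Int × Int) Int).getD (r, q r) 0)).sum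
      = 0 := by
  induction rs with
  | nil => simp
  | cons r rs ih => simp [PySem.Dict.getD_empty]

-- histogram scoring equals the direct count, for a nonempty pattern whose length divides 40
lemma histScore_eq (p : List Int) (hne : p ≠ []) (hdvd : ((p.length : Int)) ∣ 40)
    (xs : List Int) :
    histScore xs p = countMatches p xs := by
  induction xs using List.reverseRecOn with
  | nil =>
      unfold histScore
      rw [PySem.List.foldl_add]
      have h0 : histOf [] = PySem.Dict.empty := by
        simp [histOf, PySem.List.enumerate]
      rw [h0, sum_empty]
      simp [countMatches, PySem.List.enumerate]
  | append_singleton xs x ih =>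
      have hhist : histOf (xs ++ [x])
          = (histOf xs).insert ((PySem.Int.mod (xs.length : Int) 40), x)
              ((histOf xs).getD ((PySem.Int.mod (xs.length : Int) 40), x) 0 + 1) := by
        unfold histOf
        rw [PySem.List.enumerate_append, List.foldl_append]
        simp [PySem.List.enumerate]
      have hcm : countMatches p (xs ++ [x]) =
          if PySem.List.pyGetD p (PySem.Int.mod (xs.length : Int) (p.length : Int)) 0 == x
          then countMatches p xs + 1 else countMatches p xs := by
        unfold countMatches
        rw [PySem.List.enumerate_append, List.foldl_append]
        simp [PySem.List.enumerate]
      have hmodpos : PySem.Int.mod (xs.length : Int) 40 = (xs.length : Int) % 40 :=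
        PySem.Int.mod_eq_emod_of_pos (by norm_num)
      have hmem : PySem.Int.mod (xs.length : Int) 40 ∈ PySem.List.pyRange 0 40 1 := by
        rw [PySem.List.mem_pyRange_one, hmodpos]
        exact ⟨Int.emod_nonneg _ (by norm_num), Int.emod_lt_of_pos _ (by norm_num)⟩
      have hp : (0 : Int) < (p.length : Int) := by
        have : p.length ≠ 0 := fun hz => hne (List.eq_nil_of_length_eq_zero hz)
        omega
      have hmodmod :
          PySem.Int.mod (PySem.Int.mod (xs.length : Int) 40) (p.length : Int)
          = PySem.Int.mod (xs.length : Int) (p.length : Int) := by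
        rw [hmodpos, PySem.Int.mod_eq_emod_of_pos hp, PySem.Int.mod_eq_emod_of_pos hp]
        exact Int.emod_emod_of_dvd _ hdvd
      have ih' : (( PySem.List.pyRange 0 40 1).map
          (fun r => (histOf xs).getD
            (r, PySem.List.pyGetD p (PySem.Int.mod r (p.length : Int)) 0) 0)).sum
          = countMatches p xs := by
        have := ih
        unfold histScore at this
        rw [PySem.List.foldl_add] at this
        simpa using this
      unfold histScore
      rw [hhist, PySem.List.foldl_add,
          sum_insert _ _ _ _ (PySem.List.nodup_pyRange_one 0 40), ih', hcm, hmodmod]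
      have hb : ((0 : Int) ≤ (xs.length : Int) % 40 ∧ (xs.length : Int) % 40 < 40) :=
        ⟨Int.emod_nonneg _ (by norm_num), Int.emod_lt_of_pos _ (by norm_num)⟩
      by_cases hq : PySem.List.pyGetD p ((xs.length : Int) % (p.length : Int)) 0 = x
      · simp [hq, hb, PySem.Int.mod_eq_emod_of_pos hp]
      · simp [hq, PySem.Int.mod_eq_emod_of_pos hp]

-- the two tail phases (best score + winners), as named functions of the three counts
def tailA (c1 c2 c3 : Int) : List Int :=
  (PySem.List.pyRange 0 (([c1, c2, c3] : List Int).length : Int) 1).foldl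
    (fun acc i => if PySem.List.pyGetD [c1, c2, c3] i 0 ==
        (PySem.List.max? [c1, c2, c3] (fun x => x)).getD 0 then acc ++ [i + 1] else acc) []

def tailB (c1 c2 c3 : Int) : List Int :=
  (PySem.List.enumerate [c1, c2, c3] 0).filterMap
    (fun is => if is.2 == (PySem.List.max? [c1, c2, c3] (fun x => x)).getD 0
               then some (is.1 + 1) else none)

lemma tail_eq (c1 c2 c3 : Int) : tailA c1 c2 c3 = tailB c1 c2 c3 := by
  unfold tailA tailB
  have h3 : (([c1, c2, c3] : List Int).length : Int) = 3 := by simp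
  have hr : PySem.List.pyRange 0 (3 : Int) 1 = [0, 1, 2] := by decide
  rw [h3, hr]
  generalize (PySem.List.max? [c1, c2, c3] (fun x => x)).getD 0 = b
  simp [PySem.List.enumerate_cons, PySem.List.enumerate_nil, PySem.List.pyGetD,
        PySem.List.pyGet?, PySem.List.pyIdx?, List.filterMap_cons]
  split_ifs <;> simp only [List.nil_append, List.cons_append]

theorem solution_spec_aux (answers : List Int) :
    solution answers = solution_alt answers := by
  have hA : solution answers
      = tailA (countMatches [1, 2, 3, 4, 5] answers)
              (countMatches [2, 1, 2, 3, 2, 4, 2, 5] answers)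
              (countMatches [3, 3, 1, 1, 2, 2, 4, 4, 5, 5] answers) := by
    simp only [solution, tailA]
    rw [score_eq]
  have hB : solution_alt answers
      = tailB (histScore answers [1, 2, 3, 4, 5])
              (histScore answers [2, 1, 2, 3, 2, 4, 2, 5])
              (histScore answers [3, 3, 1, 1, 2, 2, 4, 4, 5, 5]) := rfl
  rw [hA, hB,
      histScore_eq _ (by simp) (by norm_num) answers,
      histScore_eq _ (by simp) (by norm_num) answers,
      histScore_eq _ (by simp) (by norm_num) answers]
  exact tail_eq _ _ _

-- ===== VERDICT (by name: the statement is the Claim_ definition above) =====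
theorem solution_spec : Claim_equal_solution := by
  intro answers _
  unfold Spec_solution
  exact solution_spec_aux answers
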